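-- pv_equiv track=rewrite | github.com/BBMRI-ERIC/directory-scripts | directory_stats_utils.py | _build_breakdown_summary_rows
-- ===== SOURCE A (Python) =====
-- from collections import Counter
-- from typing import Any
--
-- def _build_breakdown_summary_rows(
--     rows: list[dict[str, Any]],
--     label: str,
-- ) -> list[dict[str, Any]]:
--     """Return overall totals for a breakdown table."""
--     totals = Counter()
--     for row in rows:
--         totals[row[label]] += row["count"]
--     return [
--         {
--             label: key,
--             "count": totals[key],
--         }
--         for key in sorted(totals)
--     ]
-- ===== SOURCE B (Python) =====
-- def _build_breakdown_summary_rows(rows, label):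
--     """Return overall totals for a breakdown table (sort-then-group single pass)."""
--     srt = sorted(rows, key=lambda r: r[label])
--     out = []
--     i = 0
--     n = len(srt)
--     while i < n:
--         key = srt[i][label]
--         total = 0
--         while i < n and srt[i][label] == key:
--             total += srt[i]["count"]
--             i += 1
--         out.append({label: key, "count": total})
--     return out
-- ===== Notes on version B (the rewrite author's own statement) =====
-- stated objective: alternative
-- what changed: Replaces the Counter-accumulation followed by sorting the counter keys with sorting the rows once on row[label] and summing row['count'] over each run of equal labels in a single grouped pass.
import Mathlib
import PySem

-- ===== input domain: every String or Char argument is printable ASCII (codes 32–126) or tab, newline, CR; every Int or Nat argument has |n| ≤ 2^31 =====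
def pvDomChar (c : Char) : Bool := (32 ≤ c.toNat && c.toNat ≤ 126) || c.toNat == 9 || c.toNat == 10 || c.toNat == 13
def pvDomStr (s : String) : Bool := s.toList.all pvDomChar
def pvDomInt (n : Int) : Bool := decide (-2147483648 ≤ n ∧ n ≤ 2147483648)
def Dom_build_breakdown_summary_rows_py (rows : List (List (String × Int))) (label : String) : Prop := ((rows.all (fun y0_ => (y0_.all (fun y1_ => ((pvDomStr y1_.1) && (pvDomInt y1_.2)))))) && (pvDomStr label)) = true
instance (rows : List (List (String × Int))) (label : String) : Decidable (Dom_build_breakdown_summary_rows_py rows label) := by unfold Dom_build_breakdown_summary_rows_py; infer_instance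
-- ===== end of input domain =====

-- B re-implements A by sorting the rows on row[label] once and summing 'count' over each
-- run of equal labels in a single grouped pass, instead of building a Counter and sorting its keys.

-- shared accessors: row[label], row["count"] (rows are dicts; inside Pre_ the keys are present,
-- so the default 0 is never read), and the output dict literal {label: key, "count": total}
def pvKey (label : String) (r : List (String × Int)) : Int := (PySem.Dict.mk r).getD label 0
def pvCnt (r : List (String × Int)) : Int := (PySem.Dict.mk r).getD "count" 0
def pvMkRow (label : String) (k t : Int) : List (String × Int) :=
  (((PySem.Dict.mk []).insert label k).insert "count" t).items

-- ===== PORT A =====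
def build_breakdown_summary_rows_py (rows : List (List (String × Int))) (label : String) : List (List (String × Int)) :=
  let totals : PySem.Dict Int Int :=
    rows.foldl (fun t row => t.insert (pvKey label row) (t.getD (pvKey label row) 0 + pvCnt row))
      (PySem.Dict.mk [])
  (PySem.List.sorted totals.keys (fun k => k)).map (fun k => pvMkRow label k (totals.getD k 0))

-- ===== PORT B =====
def pvGroupSum (label : String) : List (List (String × Int)) → List (List (String × Int))
  | [] => []
  | r :: rest =>
    let key := pvKey label r
    let grp := rest.takeWhile (fun x => pvKey label x == key)
    let rest' := rest.dropWhile (fun x => pvKey label x == key)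
    pvMkRow label key (pvCnt r + (grp.map pvCnt).sum) :: pvGroupSum label rest'
termination_by l => l.length
decreasing_by
  simp only [List.length_cons]
  exact Nat.lt_succ_of_le (List.Sublist.length_le (List.dropWhile_sublist _))

def build_breakdown_summary_rows_py_alt (rows : List (List (String × Int))) (label : String) : List (List (String × Int)) :=
  pvGroupSum label (PySem.List.sorted rows (fun r => pvKey label r))

-- ===== PRECONDITION & SPEC =====
-- Pre_ excludes exactly the inputs on which the Python A raises KeyError: a row missing the
-- label key or the "count" key.
def Pre_build_breakdown_summary_rows_py (rows : List (List (String × Int))) (label : String) : Prop :=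
  ∀ r ∈ rows, (PySem.Dict.mk r).contains label = true ∧ (PySem.Dict.mk r).contains "count" = true
instance (rows : List (List (String × Int))) (label : String) : Decidable (Pre_build_breakdown_summary_rows_py rows label) := by unfold Pre_build_breakdown_summary_rows_py; infer_instance

def pvWitness_build_breakdown_summary_rows_py : (List (List (String × Int))) × String :=
  ([[("x", 1), ("count", 2)], [("x", 0), ("count", 5)], [("x", 1), ("count", 3)]], "x")

def Spec_build_breakdown_summary_rows_py (rows : List (List (String × Int))) (label : String) (out : List (List (String × Int))) : Prop := out = build_breakdown_summary_rows_py_alt rows label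
instance (rows : List (List (String × Int))) (label : String) (out : List (List (String × Int))) : Decidable (Spec_build_breakdown_summary_rows_py rows label out) := by unfold Spec_build_breakdown_summary_rows_py; infer_instance

-- ===== CLAIM (what is proved, stated in full; the proofs are below) =====
def Claim_equal_build_breakdown_summary_rows_py : Prop := ∀ (rows : List (List (String × Int))) (label : String), Dom_build_breakdown_summary_rows_py rows label → Pre_build_breakdown_summary_rows_py rows label → Spec_build_breakdown_summary_rows_py rows label (build_breakdown_summary_rows_py rows label)

-- ===== LEMMAS AND PROOFS =====

-- the per-key total: sum of row["count"] over the rows whose row[label] equals k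
def pvW (label : String) (rows : List (List (String × Int))) (k : Int) : Int :=
  ((rows.filter (fun r => pvKey label r == k)).map pvCnt).sum

lemma pv_discard_comm {α : Type} [BEq α] (s : PySem.Set α) (a b : α) :
    PySem.Set.discard (PySem.Set.discard s a) b = PySem.Set.discard (PySem.Set.discard s b) a := by
  simp [PySem.Set.discard, List.filter_filter, Bool.and_comm]

lemma pv_discard_discard_self {α : Type} [BEq α] (s : PySem.Set α) (a : α) :
    PySem.Set.discard (PySem.Set.discard s a) a = PySem.Set.discard s a := by
  simp [PySem.Set.discard, List.filter_filter]

lemma pv_discard_ofList (xs : List Int) (v : Int) :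
    PySem.Set.discard (PySem.Set.ofList xs) v = PySem.Set.ofList (xs.filter (fun y => !(y == v))) := by
  induction xs with
  | nil => rfl
  | cons x xs ih =>
    rw [PySem.Set.ofList_cons, List.filter_cons]
    by_cases hx : x = v
    · subst hx
      rw [if_neg (by simp)]
      show PySem.Set.discard (x :: PySem.Set.discard (PySem.Set.ofList xs) x) x = _
      simp only [PySem.Set.discard, List.filter_cons, beq_self_eq_true, Bool.not_true,
        Bool.false_eq_true, if_false]
      rw [show List.filter (fun y => !(y == x)) (List.filter (fun y => !(y == x)) (PySem.Set.ofList xs))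
            = PySem.Set.discard (PySem.Set.discard (PySem.Set.ofList xs) x) x from rfl,
          pv_discard_discard_self]
      exact ih
    · rw [if_pos (by simp [hx]), PySem.Set.ofList_cons, ← ih]
      show PySem.Set.discard (x :: PySem.Set.discard (PySem.Set.ofList xs) x) v = _
      simp only [PySem.Set.discard, List.filter_cons]
      rw [if_pos (by simp [hx])]
      congr 1
      exact pv_discard_comm _ _ _

lemma pv_getD_fold (label : String) (l : List (List (String × Int))) (d : PySem.Dict Int Int) (v : Int) :
    (l.foldl (fun t row => t.insert (pvKey label row) (t.getD (pvKey label row) 0 + pvCnt row)) d).getD v 0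
      = d.getD v 0 + pvW label l v := by
  induction l generalizing d with
  | nil => simp [pvW]
  | cons r l ih =>
    simp only [List.foldl_cons, ih, pvW, List.filter_cons]
    by_cases h : pvKey label r = v
    · simp [h]; ring
    · simp [h, PySem.Dict.getD_insert, Ne.symm h]

lemma pv_ofList_sublist {α : Type} [BEq α] [LawfulBEq α] (xs : List α) : (PySem.Set.ofList xs).Sublist xs := by
  induction xs with
  | nil => exact List.Sublist.refl _
  | cons x xs ih =>
    rw [PySem.Set.ofList_cons]
    exact List.Sublist.cons₂ x (List.Sublist.trans (show (PySem.Set.discard (PySem.Set.ofList xs) x).Sublist (PySem.Set.ofList xs) from List.filter_sublist) ih)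

lemma pv_ofList_run (k : Int) (a b : List Int) (ha : ∀ y ∈ a, y = k) (hb : ∀ y ∈ b, y ≠ k) :
    PySem.Set.ofList (k :: (a ++ b)) = k :: PySem.Set.ofList b := by
  rw [PySem.Set.ofList_cons, pv_discard_ofList, List.filter_append]
  rw [List.filter_eq_nil_iff.mpr (by intro y hy; simp [ha y hy]),
      List.filter_eq_self.mpr (by intro y hy; simp [hb y hy]), List.nil_append]

lemma pv_group_eq_aux (label : String) : ∀ (n : Nat) (l : List (List (String × Int))), l.length ≤ n →
    (l.map (pvKey label)).Pairwise (· ≤ ·) →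
    pvGroupSum label l
      = (PySem.Set.ofList (l.map (pvKey label))).map (fun k => pvMkRow label k (pvW label l k)) := by
  intro n
  induction n with
  | zero =>
    intro l hl _
    rw [List.length_eq_zero_iff.mp (Nat.le_zero.mp hl)]
    simp [pvGroupSum]
  | succ n ih =>
    intro l hl h
    match l with
    | [] => simp [pvGroupSum]
    | r :: rest =>
      rw [pvGroupSum]
      set key := pvKey label r with hkeydef
      set grp := rest.takeWhile (fun x => pvKey label x == key) with hgrpdef
      set rest' := rest.dropWhile (fun x => pvKey label x == key) with hrestdef
      have hsplit : grp ++ rest' = rest := List.takeWhile_append_dropWhile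
      have hgrp : ∀ x ∈ grp, pvKey label x = key := by
        intro x hx
        have := List.mem_takeWhile_imp hx
        simpa using this
      have hle : ∀ x ∈ rest, key ≤ pvKey label x := by
        intro x hx
        have := List.rel_of_pairwise_cons (by simpa using h) (List.mem_map_of_mem hx)
        simpa using this
      have hrest' : ∀ x ∈ rest', pvKey label x ≠ key := by
        intro x hx
        cases hr : rest' with
        | nil => rw [hr] at hx; simp at hx
        | cons y t =>
          have hy0 : (pvKey label y == key) = false := by
            have := List.head_dropWhile_not (fun x => pvKey label x == key)
              (l := rest) (by rw [← hrestdef, hr]; simp)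
            simpa [← hrestdef, hr] using this
          have hyne : pvKey label y ≠ key := by simpa using hy0
          have hymem : y ∈ rest := (List.dropWhile_sublist _).subset (by rw [← hrestdef, hr]; simp)
          have hky : key < pvKey label y := lt_of_le_of_ne (hle y hymem) (Ne.symm hyne)
          rw [hr] at hx
          rcases List.mem_cons.mp hx with rfl | hxt
          · exact hyne
          · have hsub : (rest'.map (pvKey label)).Sublist (rest.map (pvKey label)) :=
              List.Sublist.map _ (List.dropWhile_sublist _)
            have hpw : (rest'.map (pvKey label)).Pairwise (· ≤ ·) :=
              List.Pairwise.sublist hsub (by simpa using (List.pairwise_cons.mp (by simpa using h)).2)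
            have : pvKey label y ≤ pvKey label x := by
              rw [hr] at hpw
              exact List.rel_of_pairwise_cons (by simpa using hpw) (List.mem_map_of_mem hxt)
            exact fun hc => by
              have h2 := lt_of_lt_of_le hky this
              rw [hc] at h2
              exact lt_irrefl _ h2
      have hof : PySem.Set.ofList ((r :: rest).map (pvKey label))
          = key :: PySem.Set.ofList (rest'.map (pvKey label)) := by
        rw [List.map_cons, ← hsplit, List.map_append]
        exact pv_ofList_run key _ _
          (by intro y hy; rcases List.mem_map.mp hy with ⟨x, hx, rfl⟩; exact hgrp x hx)
          (by intro y hy; rcases List.mem_map.mp hy with ⟨x, hx, rfl⟩; exact hrest' x hx)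
      rw [hof, List.map_cons]
      have hWhead : pvW label (r :: rest) key = pvCnt r + (grp.map pvCnt).sum := by
        unfold pvW
        rw [List.filter_cons, if_pos (by simp [hkeydef]), ← hsplit, List.filter_append,
          List.filter_eq_self.mpr (by intro y hy; simp [hgrp y hy]),
          List.filter_eq_nil_iff.mpr (by intro y hy; simp [hrest' y hy]), List.append_nil,
          List.map_cons, List.sum_cons]
      have hpw' : (rest'.map (pvKey label)).Pairwise (· ≤ ·) :=
        List.Pairwise.sublist (List.Sublist.map _ (List.dropWhile_sublist _))
          (by simpa using (List.pairwise_cons.mp (by simpa using h)).2)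
      have hlen : rest'.length ≤ n := by
        have h1 : rest'.length ≤ rest.length := List.Sublist.length_le (List.dropWhile_sublist _)
        have h2 : rest.length + 1 ≤ n + 1 := by simpa using hl
        omega
      rw [ih rest' hlen hpw']
      congr 1
      · rw [hWhead, hkeydef]
      · apply List.map_congr_left
        intro k' hk'
        have hk'mem : k' ∈ rest'.map (pvKey label) := (PySem.Set.mem_ofList _ _).mp hk'
        have hk'ne : k' ≠ key := by
          rcases List.mem_map.mp hk'mem with ⟨x, hx, rfl⟩
          exact hrest' x hx
        have hWtail : pvW label (r :: rest) k' = pvW label rest' k' := by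
          unfold pvW
          rw [List.filter_cons, if_neg (by rw [← hkeydef]; simpa using fun hc => hk'ne hc.symm), ← hsplit, List.filter_append,
            List.filter_eq_nil_iff.mpr (by intro y hy; simp [hgrp y hy, Ne.symm hk'ne]), List.nil_append]
        rw [hWtail]

lemma pv_group_eq (label : String) (l : List (List (String × Int)))
    (h : (l.map (pvKey label)).Pairwise (· ≤ ·)) :
    pvGroupSum label l
      = (PySem.Set.ofList (l.map (pvKey label))).map (fun k => pvMkRow label k (pvW label l k)) :=
  pv_group_eq_aux label l.length l (Nat.le_refl _) h

-- ===== VERDICT (by name: the statement is the Claim_ definition above) =====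

theorem build_breakdown_summary_rows_py_spec : Claim_equal_build_breakdown_summary_rows_py := by
  intro rows label _ _
  unfold Spec_build_breakdown_summary_rows_py
  unfold build_breakdown_summary_rows_py build_breakdown_summary_rows_py_alt
  set s := PySem.List.sorted rows (fun r => pvKey label r) with hsdef
  -- A's totals: keys and per-key values
  have hkeys : (rows.foldl (fun t row => t.insert (pvKey label row) (t.getD (pvKey label row) 0 + pvCnt row))
      (PySem.Dict.mk [] : PySem.Dict Int Int)).keys = PySem.Set.ofList (rows.map (pvKey label)) := by
    rw [PySem.Dict.keys_foldl_insert_key rows (pvKey label)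
      (fun t row => t.getD (pvKey label row) 0 + pvCnt row) (PySem.Dict.mk [])]
    simp [PySem.Dict.keys, PySem.Set.update_nil_left]
  have hvals : ∀ k, (rows.foldl (fun t row => t.insert (pvKey label row) (t.getD (pvKey label row) 0 + pvCnt row))
      (PySem.Dict.mk [] : PySem.Dict Int Int)).getD k 0 = pvW label rows k := by
    intro k
    rw [pv_getD_fold]
    simp [PySem.Dict.getD, PySem.Dict.get?]
  simp only [hkeys, hvals]
  -- B's grouped pass
  have hpw : (s.map (pvKey label)).Pairwise (· ≤ ·) := by
    rw [hsdef]
    exact PySem.List.sorted_map_key_pairwise rows (pvKey label)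
  rw [pv_group_eq label s hpw]
  -- the two key lists coincide
  have hperm : s.Perm rows := PySem.List.sorted_perm rows (fun r => pvKey label r) false
  have hkeyperm : (s.map (pvKey label)).Perm (rows.map (pvKey label)) := hperm.map _
  have hof : PySem.List.sorted (PySem.Set.ofList (rows.map (pvKey label))) (fun k => k)
      = PySem.Set.ofList (s.map (pvKey label)) := by
    apply PySem.List.sorted_eq_of_perm_of_pairwise_lt
    · exact (List.perm_ext_iff_of_nodup (PySem.Set.nodup_ofList _) (PySem.Set.nodup_ofList _)).mpr
        (fun a => by
          rw [PySem.Set.mem_ofList, PySem.Set.mem_ofList]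
          exact hkeyperm.mem_iff)
    · have h1 : (PySem.Set.ofList (s.map (pvKey label))).Pairwise (· ≤ ·) :=
        List.Pairwise.sublist (pv_ofList_sublist _) hpw
      have h2 : (PySem.Set.ofList (s.map (pvKey label))).Pairwise (· ≠ ·) :=
        PySem.Set.nodup_ofList _
      exact (h1.and h2).imp (fun ⟨hle, hne⟩ => lt_of_le_of_ne hle hne)
  -- the per-key totals coincide
  have hW : ∀ k, pvW label s k = pvW label rows k := by
    intro k
    exact List.Perm.sum_eq (List.Perm.map pvCnt (List.Perm.filter _ hperm))
  rw [hof]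
  exact List.map_congr_left (fun k _ => by rw [hW k])
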